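-- pv_equiv track=rewrite | github.com/vitruvyan/vitruvyan-core | vitruvyan_core/core/platform/update_manager/engine/compatibility.py | _match_wildcard
-- ===== SOURCE A (Python) =====
-- def _match_wildcard(version: str, pattern: str) -> bool:
--     """
--     Match version against wildcard pattern.
--
--     Wildcard semantics (P0 contract): "x" = any non-negative integer
--
--     Args:
--         version: SemVer string (e.g., "1.2.3")
--         pattern: Wildcard pattern (e.g., "1.x.x", "1.2.x")
--
--     Returns:
--         True if version matches pattern
--
--     Examples:
--         _match_wildcard("1.5.2", "1.x.x") → True
--         _match_wildcard("2.0.0", "1.x.x") → False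
--         _match_wildcard("1.2.99", "1.2.x") → True
--     """
--     # Strip prerelease/metadata from version
--     version_base = version.split("-")[0].split("+")[0]
--
--     pattern_parts = pattern.lower().split(".")
--     version_parts = version_base.split(".")
--
--     # Must have same number of parts
--     if len(pattern_parts) != len(version_parts):
--         return False
--
--     for pattern_part, version_part in zip(pattern_parts, version_parts):
--         if pattern_part == "x":
--             continue  # Wildcard matches any value
--         if pattern_part != version_part:
--             return False
--
--     return True
-- ===== SOURCE B (Python) =====
-- def _match_wildcard(version: str, pattern: str) -> bool:
--     # Single left-to-right scan over the two strings (no splitting into part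
--     # lists): version is truncated at the first '-' or '+', then both strings
--     # are walked part-by-part with two cursors.
--     v = []
--     for ch in version:
--         if ch == "-" or ch == "+":
--             break
--         v.append(ch)
--     p = [c.lower() for c in pattern]
--     i, j, n, m = 0, 0, len(v), len(p)
--     while True:
--         if j < m and p[j] == "x" and (j + 1 == m or p[j + 1] == "."):
--             # wildcard part: skip the whole version part
--             j += 1
--             while i < n and v[i] != ".":
--                 i += 1
--         else:
--             # literal part: compare character by character up to the boundary
--             while i < n and j < m and v[i] == p[j] and v[i] != ".":
--                 i += 1
--                 j += 1
--         if i == n and j == m: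
--             return True
--         if i < n and j < m and v[i] == "." and p[j] == ".":
--             i += 1
--             j += 1
--         else:
--             return False
-- ===== Notes on version B (the rewrite author's own statement) =====
-- stated objective: alternative
-- what changed: A splits both strings into part lists and compares them pairwise with zip; B never builds part lists: it truncates the version at the first '-'/'+' and matches with a single left-to-right two-cursor scan, consuming a whole version part at each 'x' pattern part and comparing character by character otherwise.
import Mathlib
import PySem

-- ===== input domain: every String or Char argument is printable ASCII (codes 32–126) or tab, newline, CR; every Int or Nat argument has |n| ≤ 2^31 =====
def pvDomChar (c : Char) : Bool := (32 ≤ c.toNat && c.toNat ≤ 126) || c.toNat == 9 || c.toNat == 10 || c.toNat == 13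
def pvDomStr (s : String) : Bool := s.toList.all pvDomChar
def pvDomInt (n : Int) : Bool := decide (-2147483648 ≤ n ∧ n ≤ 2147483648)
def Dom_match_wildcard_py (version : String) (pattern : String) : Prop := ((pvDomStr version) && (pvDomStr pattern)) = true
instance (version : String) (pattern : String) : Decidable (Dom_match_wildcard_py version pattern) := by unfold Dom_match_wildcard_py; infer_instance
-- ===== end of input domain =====

-- B replaces A's split-into-parts-and-zip pass by a single two-cursor scan over the two
-- strings (alternative decomposition; return value proved equal on all inputs).

-- ===== PORT A =====
-- version.split(sep)[0]: split with a nonempty separator never yields an empty list,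
-- so the [0] indexing cannot raise and `headD ""` is exact.
def match_wildcard_py (version : String) (pattern : String) : Bool :=
  let vb1 : String := ((PySem.Str.split? version "-").getD []).headD ""
  let version_base : String := ((PySem.Str.split? vb1 "+").getD []).headD ""
  let pattern_parts : List String := (PySem.Str.split? (PySem.Str.lower pattern) ".").getD []
  let version_parts : List String := (PySem.Str.split? version_base ".").getD []
  if pattern_parts.length ≠ version_parts.length then false
  else (pattern_parts.zip version_parts).all (fun q => q.1 == "x" || q.1 == q.2)

-- ===== PORT B =====
-- Source B's while-loop with cursors i, j becomes mutual structural recursion on the two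
-- suffixes: bScan = loop entry at a part boundary, bLit = the literal-compare inner
-- loop, bTail = the boundary check at the bottom of the loop body.
mutual
def bScan (v p : List Char) : Bool :=
  if p.head? = some 'x' ∧ (p.tail = [] ∨ p.tail.head? = some '.') then
    bTail (v.dropWhile (· != '.')) p.tail
  else bLit v p
termination_by 3 * (v.length + p.length) + 2
decreasing_by
  · have h1 := List.length_dropWhile_le (fun c => c != '.') v
    have h2 : p ≠ [] := by rintro rfl; simp at *
    cases p with
    | nil => simp at h2
    | cons b p' => simp only [List.tail_cons, List.length_cons]; omega
  · omega

def bLit (v p : List Char) : Bool :=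
  match v, p with
  | a :: v', b :: p' => if a = b ∧ a ≠ '.' then bLit v' p' else bTail (a :: v') (b :: p')
  | v, p => bTail v p
termination_by 3 * (v.length + p.length) + 1
decreasing_by
  · simp only [List.length_cons]; omega
  · simp only [List.length_cons]; omega
  · omega

def bTail (v p : List Char) : Bool :=
  match v, p with
  | [], [] => true
  | a :: v', b :: p' => if a = '.' ∧ b = '.' then bScan v' p' else false
  | _, _ => false
termination_by 3 * (v.length + p.length)
decreasing_by
  · simp only [List.length_cons]; omega
end

def match_wildcard_py_alt (version : String) (pattern : String) : Bool :=
  let v := version.toList.takeWhile (fun c => !(c == '-' || c == '+'))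
  let p := pattern.toList.map PySem.Chars.lowerChar
  bScan v p

-- ===== PRECONDITION & SPEC =====
def Spec_match_wildcard_py (version : String) (pattern : String) (out : Bool) : Prop := out = match_wildcard_py_alt version pattern
instance (version : String) (pattern : String) (out : Bool) : Decidable (Spec_match_wildcard_py version pattern out) := by unfold Spec_match_wildcard_py; infer_instance

-- ===== CLAIM (what is proved, stated in full; the proofs are below) =====
def Claim_equal_match_wildcard_py : Prop := ∀ (version : String) (pattern : String), Dom_match_wildcard_py version pattern → Spec_match_wildcard_py version pattern (match_wildcard_py version pattern)

-- ===== LEMMAS AND PROOFS =====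

-- Clean recursive model of Python's str.split with a single-character separator.
def pySplit (c : Char) : List Char → List (List Char)
  | [] => [[]]
  | d :: rest => if d = c then [] :: pySplit c rest else (pySplit c rest).modifyHead (d :: ·)

theorem pySplit_ne_nil (c : Char) (l : List Char) : pySplit c l ≠ [] := by
  cases l with
  | nil => simp [pySplit]
  | cons d rest =>
    simp only [pySplit]
    split
    · simp
    · cases h : pySplit c rest with
      | nil => exact absurd h (pySplit_ne_nil c rest)
      | cons a t => simp [List.modifyHead]

theorem splitOn_go_eq (c : Char) :
    ∀ (l : List Char) (fuel : Nat) (cur : List Char) (acc : List (List Char)),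
    l.length < fuel →
    PySem.Chars.splitOn.go [c] fuel l cur acc
      = acc.reverse ++ (pySplit c l).modifyHead (cur.reverse ++ ·) := by
  intro l
  induction l with
  | nil =>
    intro fuel cur acc h
    match fuel with
    | f + 1 => simp [PySem.Chars.splitOn.go, pySplit]
  | cons d rest ih =>
    intro fuel cur acc h
    match fuel with
    | f + 1 =>
      simp only [List.length_cons] at h
      by_cases hd : d = c
      · have hpre : List.isPrefixOf [c] (d :: rest) = true := by
          simp [List.isPrefixOf, hd]
        simp only [PySem.Chars.splitOn.go, hpre, if_pos]
        have hdrop : List.drop [c].length (d :: rest) = rest := by simp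
        rw [hdrop, ih f [] (cur.reverse :: acc) (by omega)]
        simp [pySplit, hd, List.modifyHead]
        cases pySplit c rest <;> rfl
      · have hpre : List.isPrefixOf [c] (d :: rest) = false := by
          simp [List.isPrefixOf]
          exact fun hh => absurd hh.symm hd
        simp only [PySem.Chars.splitOn.go, hpre, Bool.false_eq_true, if_false]
        rw [ih f (d :: cur) acc (by omega)]
        simp only [pySplit, hd, if_neg, not_false_iff]
        cases hps : pySplit c rest with
        | nil => exact absurd hps (pySplit_ne_nil c rest)
        | cons x t => simp [List.modifyHead]

theorem splitOn_eq_pySplit (c : Char) (l : List Char) :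
    PySem.Chars.splitOn l [c] = pySplit c l := by
  unfold PySem.Chars.splitOn
  rw [splitOn_go_eq c l (l.length + 1) [] [] (by omega)]
  cases h : pySplit c l with
  | nil => exact absurd h (pySplit_ne_nil c l)
  | cons a t => simp [List.modifyHead]

theorem pySplit_headD (c : Char) (l : List Char) :
    (pySplit c l).headD [] = l.takeWhile (· != c) := by
  induction l with
  | nil => simp [pySplit]
  | cons d rest ih =>
    simp only [pySplit]
    by_cases hd : d = c
    · rw [if_pos hd, List.takeWhile_cons_of_neg (by simp [hd])]
      rfl
    · rw [if_neg hd, List.takeWhile_cons_of_pos (by simp [hd])]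
      cases hps : pySplit c rest with
      | nil => exact absurd hps (pySplit_ne_nil c rest)
      | cons a t =>
        rw [hps] at ih
        simp only [List.modifyHead, List.headD_cons] at *
        rw [ih]

theorem pySplit_tail (c : Char) (l : List Char) :
    (pySplit c l).tail = (match l.dropWhile (· != c) with
      | [] => []
      | _ :: r => pySplit c r) := by
  induction l with
  | nil => simp [pySplit]
  | cons d rest ih =>
    simp only [pySplit]
    by_cases hd : d = c
    · rw [if_pos hd, List.dropWhile_cons_of_neg (by simp [hd])]
      simp
    · rw [if_neg hd, List.dropWhile_cons_of_pos (by simp [hd])]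
      cases hps : pySplit c rest with
      | nil => exact absurd hps (pySplit_ne_nil c rest)
      | cons a t =>
        rw [hps] at ih
        simp only [List.modifyHead, List.tail_cons] at *
        rw [ih]


theorem pySplit_eq_cons (c : Char) (l : List Char) :
    pySplit c l = l.takeWhile (· != c) :: (pySplit c l).tail := by
  cases hps : pySplit c l with
  | nil => exact absurd hps (pySplit_ne_nil c l)
  | cons a t =>
    have hh := pySplit_headD c l
    rw [hps] at hh
    simp only [List.headD_cons] at hh
    simp [hh]

theorem dropWhile_head {q : Char → Bool} {l r : List Char} {a : Char}
    (h : l.dropWhile q = a :: r) : q a = false := by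
  induction l with
  | nil => simp [List.dropWhile] at h
  | cons d rest ih =>
    by_cases hd : q d
    · rw [List.dropWhile_cons_of_pos hd] at h; exact ih h
    · rw [List.dropWhile_cons_of_neg hd] at h
      cases h; simpa using hd

theorem succ_beq_succ (a b : Nat) : (a + 1 == b + 1) = (a == b) := by
  by_cases h : a = b
  · subst h; simp
  · simp

-- what A computes on char lists, via pySplit
def partOk (q : List Char × List Char) : Bool := q.1 == ['x'] || q.1 == q.2

def partsMatch (pps vps : List (List Char)) : Bool :=
  (pps.length == vps.length) && (pps.zip vps).all partOk

def scanSpec (v p : List Char) : Bool := partsMatch (pySplit '.' p) (pySplit '.' v)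

def litSpec (v p : List Char) : Bool :=
  ((pySplit '.' p).length == (pySplit '.' v).length)
  && (p.takeWhile (· != '.') == v.takeWhile (· != '.'))
  && (((pySplit '.' p).tail).zip ((pySplit '.' v).tail)).all partOk

theorem takeWhile_eq_x {p : List Char}
    (h : p.takeWhile (· != '.') = ['x']) :
    p.head? = some 'x' ∧ (p.tail = [] ∨ p.tail.head? = some '.') := by
  cases p with
  | nil => simp [List.takeWhile] at h
  | cons b p' =>
    by_cases hb : b = '.'
    · rw [List.takeWhile_cons_of_neg (by simp [hb])] at h; simp at h
    · rw [List.takeWhile_cons_of_pos (by simp [hb])] at h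
      obtain ⟨hbx, htw⟩ := List.cons_eq_cons.mp h
      subst hbx
      refine ⟨rfl, ?_⟩
      cases p' with
      | nil => left; rfl
      | cons d r =>
        right
        by_cases hd : d = '.'
        · simp [hd]
        · rw [List.takeWhile_cons_of_pos (by simp [hd])] at htw; simp at htw

theorem bTail_nil_nil : bTail [] [] = true := by rw [bTail.eq_def]
theorem bTail_cons_cons (a : Char) (v' : List Char) (b : Char) (p' : List Char) :
    bTail (a :: v') (b :: p') = if a = '.' ∧ b = '.' then bScan v' p' else false := by
  rw [bTail.eq_def]
theorem bTail_nil_cons (b : Char) (p' : List Char) : bTail [] (b :: p') = false := by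
  rw [bTail.eq_def]
theorem bTail_cons_nil (a : Char) (v' : List Char) : bTail (a :: v') [] = false := by
  rw [bTail.eq_def]
theorem bLit_cons_cons (a : Char) (v' : List Char) (b : Char) (p' : List Char) :
    bLit (a :: v') (b :: p') = if a = b ∧ a ≠ '.' then bLit v' p' else bTail (a :: v') (b :: p') := by
  rw [bLit.eq_def]
theorem bLit_nil (p : List Char) : bLit [] p = bTail [] p := by
  cases p <;> rw [bLit.eq_def]
theorem bLit_nil_right (v : List Char) : bLit v [] = bTail v [] := by
  cases v <;> rw [bLit.eq_def]
theorem bScan_eq (v p : List Char) :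
    bScan v p = if p.head? = some 'x' ∧ (p.tail = [] ∨ p.tail.head? = some '.') then
      bTail (v.dropWhile (· != '.')) p.tail else bLit v p := by
  rw [bScan]

theorem pySplit_dot_cons (b : Char) (p' : List Char) (hb : b ≠ '.') :
    pySplit '.' (b :: p') = (b :: (pySplit '.' p').headD []) :: (pySplit '.' p').tail := by
  simp only [pySplit, hb, if_neg, not_false_iff]
  cases hps : pySplit '.' p' with
  | nil => exact absurd hps (pySplit_ne_nil '.' p')
  | cons x t => simp [List.modifyHead]

-- main invariant: bLit / bScan compute A's parts comparison on the remaining suffixes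
theorem main_inv (n : Nat) : ∀ v p : List Char, v.length + p.length ≤ n →
    bLit v p = litSpec v p ∧ bScan v p = scanSpec v p := by
  induction n with
  | zero =>
    intro v p h
    have hv : v = [] := by cases v <;> simp_all
    have hp : p = [] := by cases p <;> simp_all
    subst hv; subst hp
    constructor
    · rw [bLit_nil, bTail_nil_nil]
      simp [litSpec, pySplit]
    · rw [bScan_eq]
      simp only [List.head?_nil, reduceCtorEq, false_and, if_neg, not_false_iff]
      rw [bLit_nil, bTail_nil_nil]
      simp [scanSpec, partsMatch, pySplit, partOk]
  | succ n ih =>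
    intro v p h
    have hlit : bLit v p = litSpec v p := by
      cases v with
      | nil =>
        cases p with
        | nil =>
          rw [bLit_nil, bTail_nil_nil]; simp [litSpec, pySplit]
        | cons b p' =>
          rw [bLit_nil, bTail_nil_cons]
          by_cases hb : b = '.'
          · subst hb
            have h1 := pySplit_ne_nil '.' p'
            simp only [litSpec]
            rw [(by simp [pySplit] : pySplit '.' ('.' :: p') = [] :: pySplit '.' p')]
            simp only [pySplit, List.length_cons]
            have h2 : (pySplit '.' p').length ≠ 0 := by
              intro h3; exact h1 (List.length_eq_zero_iff.mp h3)
            have h4 : ((pySplit '.' p').length + 1 == 1) = false := by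
              simp only [beq_eq_false_iff_ne]; omega
            simp [h4]
          · simp only [litSpec]
            rw [List.takeWhile_cons_of_pos (by simp [hb])]
            simp [List.takeWhile]
      | cons a v' =>
        cases p with
        | nil =>
          rw [bLit_nil_right, bTail_cons_nil]
          by_cases ha : a = '.'
          · subst ha
            have h1 := pySplit_ne_nil '.' v'
            simp only [litSpec]
            rw [(by simp [pySplit] : pySplit '.' ('.' :: v') = [] :: pySplit '.' v')]
            simp only [pySplit, List.length_cons]
            have h2 : (pySplit '.' v').length ≠ 0 := by
              intro h3; exact h1 (List.length_eq_zero_iff.mp h3)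
            have h4 : (1 == (pySplit '.' v').length + 1) = false := by
              simp only [beq_eq_false_iff_ne]; omega
            simp [h4]
          · simp only [litSpec]
            rw [List.takeWhile_cons_of_pos (by simp [ha])]
            simp [List.takeWhile]
        | cons b p' =>
          rw [bLit_cons_cons]
          by_cases hab : a = b ∧ a ≠ '.'
          · rw [if_pos hab]
            obtain ⟨hab1, hab2⟩ := hab
            subst hab1
            have hlit' := (ih v' p' (by simp only [List.length_cons] at h; omega)).1
            rw [hlit']
            simp only [litSpec]
            rw [pySplit_dot_cons a v' hab2, pySplit_dot_cons a p' hab2]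
            simp only [List.length_cons, List.tail_cons, succ_beq_succ]
            rw [List.takeWhile_cons_of_pos (by simp [hab2]),
                List.takeWhile_cons_of_pos (by simp [hab2])]
            conv_lhs => rw [pySplit_eq_cons '.' p', pySplit_eq_cons '.' v']
            simp only [List.length_cons, List.tail_cons, succ_beq_succ, List.cons_beq_cons,
              beq_self_eq_true, Bool.true_and]
          · rw [if_neg hab, bTail_cons_cons]
            by_cases hdd : a = '.' ∧ b = '.'
            · rw [if_pos hdd]
              obtain ⟨ha, hb⟩ := hdd
              subst ha; subst hb
              have hscan' := (ih v' p' (by simp only [List.length_cons] at h; omega)).2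
              rw [hscan']
              simp only [litSpec, scanSpec, partsMatch]
              rw [(by simp [pySplit] : pySplit '.' ('.' :: v') = [] :: pySplit '.' v'),
                  (by simp [pySplit] : pySplit '.' ('.' :: p') = [] :: pySplit '.' p')]
              simp only [List.length_cons, List.tail_cons, succ_beq_succ]
              rw [List.takeWhile_cons_of_neg (by simp), List.takeWhile_cons_of_neg (by simp)]
              simp
            · rw [if_neg hdd]
              -- mismatch: first parts differ, litSpec is false
              simp only [litSpec]
              by_cases ha : a = '.'
              · subst ha
                have hb : b ≠ '.' := by
                  intro hb; exact hdd ⟨rfl, hb⟩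
                rw [(List.takeWhile_cons_of_pos (p := (· != '.')) (by simp [hb]) :
                      List.takeWhile _ (b :: p') = _),
                    (List.takeWhile_cons_of_neg (p := (· != '.')) (by simp) :
                      List.takeWhile _ ('.' :: v') = _)]
                simp
              · by_cases hb : b = '.'
                · subst hb
                  rw [(List.takeWhile_cons_of_neg (p := (· != '.')) (by simp) :
                        List.takeWhile _ ('.' :: p') = _),
                      (List.takeWhile_cons_of_pos (p := (· != '.')) (by simp [ha]) :
                        List.takeWhile _ (a :: v') = _)]
                  simp
                · have hne : a ≠ b := by
                    intro hEq; exact hab ⟨hEq, ha⟩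
                  rw [(List.takeWhile_cons_of_pos (p := (· != '.')) (by simp [hb]) :
                        List.takeWhile _ (b :: p') = _),
                      (List.takeWhile_cons_of_pos (p := (· != '.')) (by simp [ha]) :
                        List.takeWhile _ (a :: v') = _)]
                  have : (b :: List.takeWhile (· != '.') p' == a :: List.takeWhile (· != '.') v') = false := by
                    simp only [beq_eq_false_iff_ne]
                    intro hEq
                    exact hne ((List.cons_eq_cons.mp hEq).1.symm)
                  simp [this]
    refine ⟨hlit, ?_⟩
    rw [bScan_eq]
    by_cases hw : p.head? = some 'x' ∧ (p.tail = [] ∨ p.tail.head? = some '.')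
    · rw [if_pos hw]
      obtain ⟨hx, hrest⟩ := hw
      cases p with
      | nil => simp at hx
      | cons b rest =>
        simp only [List.head?_cons, Option.some_inj] at hx
        subst hx
        simp only [List.tail_cons] at hrest ⊢
        rcases hrest with hre | hre
        · -- pattern = ['x']
          subst hre
          have hp1 : pySplit '.' ['x'] = [['x']] := by simp [pySplit, List.modifyHead]
          cases hdw : v.dropWhile (· != '.') with
          | nil =>
            rw [bTail_nil_nil]
            simp only [scanSpec, partsMatch, hp1]
            rw [pySplit_eq_cons '.' v, pySplit_tail '.' v, hdw]
            simp [partOk]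
          | cons c r =>
            have hc : c = '.' := by
              have := dropWhile_head hdw
              simpa using this
            subst hc
            rw [bTail_cons_nil]
            simp only [scanSpec, partsMatch, hp1]
            rw [pySplit_eq_cons '.' v, pySplit_tail '.' v, hdw]
            have h1 := pySplit_ne_nil '.' r
            have h2 : (pySplit '.' r).length ≠ 0 := by
              intro h3; exact h1 (List.length_eq_zero_iff.mp h3)
            have h4 : (1 == (pySplit '.' r).length + 1) = false := by
              simp only [beq_eq_false_iff_ne]; omega
            simp [h4]
        · -- pattern = 'x' :: '.' :: rest'
          cases rest with
          | nil => simp at hre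
          | cons d rest' =>
            simp only [List.head?_cons, Option.some_inj] at hre
            subst hre
            have hp2 : pySplit '.' ('x' :: '.' :: rest') = ['x'] :: pySplit '.' rest' := by
              rw [pySplit_dot_cons 'x' ('.' :: rest') (by decide)]
              rw [(by simp [pySplit] : pySplit '.' ('.' :: rest') = [] :: pySplit '.' rest')]
              simp
            cases hdw : v.dropWhile (· != '.') with
            | nil =>
              rw [bTail_nil_cons]
              simp only [scanSpec, partsMatch, hp2]
              rw [pySplit_eq_cons '.' v, pySplit_tail '.' v, hdw]
              have h1 := pySplit_ne_nil '.' rest'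
              have h2 : (pySplit '.' rest').length ≠ 0 := by
                intro h3; exact h1 (List.length_eq_zero_iff.mp h3)
              have h4 : ((pySplit '.' rest').length + 1 == 1) = false := by
                simp only [beq_eq_false_iff_ne]; omega
              simp [h4]
            | cons c r =>
              have hc : c = '.' := by
                have := dropWhile_head hdw
                simpa using this
              subst hc
              rw [bTail_cons_cons, if_pos ⟨rfl, rfl⟩]
              have hsum : r.length + rest'.length ≤ n := by
                have hle := List.length_dropWhile_le (fun x => x != '.') v
                rw [hdw] at hle
                simp only [List.length_cons] at hle h
                omega
              rw [(ih r rest' hsum).2]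
              simp only [scanSpec, partsMatch, hp2]
              rw [pySplit_eq_cons '.' v, pySplit_tail '.' v, hdw]
              simp only [List.length_cons, succ_beq_succ, List.zip_cons_cons, List.all_cons]
              simp [partOk]
    · rw [if_neg hw, hlit]
      -- first pattern part is not "x": scanSpec and litSpec coincide
      have hnx : (p.takeWhile (· != '.') == ['x']) = false := by
        rcases hq : (p.takeWhile (· != '.') == ['x']) with _ | _
        · rfl
        · exact absurd (takeWhile_eq_x (by simpa using hq)) hw
      simp only [scanSpec, litSpec, partsMatch]
      rw [pySplit_eq_cons '.' p, pySplit_eq_cons '.' v]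
      simp only [List.length_cons, succ_beq_succ, List.zip_cons_cons, List.all_cons,
        List.tail_cons, partOk, hnx, Bool.false_or]
      rw [Bool.and_assoc]

theorem headD_toList (xs : List String) :
    (xs.headD "").toList = (xs.map String.toList).headD [] := by
  cases xs <;> rfl

theorem str_beq_toList (s t : String) : (s == t) = (s.toList == t.toList) := by
  by_cases h : s = t
  · subst h; simp
  · have h2 : s.toList ≠ t.toList := fun hh => h (String.toList_inj.mp hh)
    simp [h, h2]

theorem strSplit_toList (s sep : String) (h : sep.toList ≠ []) :
    ((PySem.Str.split? s sep).getD []).map String.toList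
      = PySem.Chars.splitOn s.toList sep.toList := by
  have h2 := PySem.Str.split?_map s sep
  unfold PySem.Chars.split? at h2
  rw [if_neg (by simp [h])] at h2
  cases hsp : PySem.Str.split? s sep with
  | none => rw [hsp] at h2; simp at h2
  | some xs =>
    rw [hsp] at h2
    simp only [Option.map_some, Option.some_inj] at h2
    simp [h2]

theorem if_to_partsMatch (pp vp : List String) :
    (if pp.length ≠ vp.length then false
     else (pp.zip vp).all (fun q => q.1 == "x" || q.1 == q.2))
    = partsMatch (pp.map String.toList) (vp.map String.toList) := by
  unfold partsMatch
  by_cases hl : pp.length = vp.length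
  · rw [if_neg (by simp [hl])]
    have hb : ((pp.map String.toList).length == (vp.map String.toList).length) = true := by
      simp [hl]
    rw [hb, Bool.true_and, List.zip_map, List.all_map]
    have hf : (partOk ∘ Prod.map String.toList String.toList)
        = (fun (q : String × String) => q.1 == "x" || q.1 == q.2) := by
      funext q
      simp only [Function.comp_apply, partOk, Prod.map]
      rw [str_beq_toList q.1 "x", str_beq_toList q.1 q.2]
      rfl
    rw [hf]
  · rw [if_pos hl]
    have hb : ((pp.map String.toList).length == (vp.map String.toList).length) = false := by
      simp only [List.length_map, beq_eq_false_iff_ne]; exact hl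
    rw [hb, Bool.false_and]

theorem partsOf (s : String) :
    ((PySem.Str.split? s ".").getD []).map String.toList = pySplit '.' s.toList := by
  rw [strSplit_toList _ "." (by decide)]
  have h1 : ".".toList = ['.'] := rfl
  rw [h1, splitOn_eq_pySplit]

theorem portA_eq (version pattern : String) :
    match_wildcard_py version pattern
      = scanSpec (version.toList.takeWhile (fun c => !(c == '-' || c == '+')))
                 (pattern.toList.map PySem.Chars.lowerChar) := by
  have hvb1 : (((PySem.Str.split? version "-").getD []).headD "").toList
      = version.toList.takeWhile (· != '-') := by
    rw [headD_toList, strSplit_toList version "-" (by decide)]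
    have h1 : "-".toList = ['-'] := rfl
    rw [h1, splitOn_eq_pySplit, pySplit_headD]
  have hvb2 : (((PySem.Str.split?
        ((((PySem.Str.split? version "-").getD []).headD "")) "+").getD []).headD "").toList
      = version.toList.takeWhile (fun c => !(c == '-' || c == '+')) := by
    rw [headD_toList, strSplit_toList _ "+" (by decide)]
    have h1 : "+".toList = ['+'] := rfl
    rw [h1, splitOn_eq_pySplit, pySplit_headD, hvb1, List.takeWhile_takeWhile]
    have h2 : (fun a => decide ((a != '+') = true ∧ (a != '-') = true))
        = (fun c => !(c == '-' || c == '+')) := by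
      funext c
      by_cases hc1 : c = '-' <;> by_cases hc2 : c = '+' <;> simp [hc1, hc2]
    rw [h2]
  simp only [match_wildcard_py]
  rw [if_to_partsMatch]
  unfold scanSpec
  rw [partsOf, partsOf, hvb2, PySem.Str.toList_lower]
  rfl

-- ===== VERDICT (by name: the statement is the Claim_ definition above) =====
theorem match_wildcard_py_spec : Claim_equal_match_wildcard_py := by
  intro version pattern _
  unfold Spec_match_wildcard_py
  rw [portA_eq]
  unfold match_wildcard_py_alt
  simp only
  exact (main_inv _ _ _ le_rfl).2.symm
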